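-- pv_equiv track=rewrite | github.com/dariusc8520/MIT-6.009 | lab7/lab.py | pattern_filter
-- ===== SOURCE A (Python) =====
-- def pattern_filter(pattern):
--     '''
--     Removes repeating '*'s in a pattern sequence
--     '''
--     filtered_pattern = ''
--     for i in range(len(pattern)):
--         if i < len(pattern)-1:
--             if pattern[i] == '*' and pattern[i+1] == '*':
--                 pass
--             elif i > 0:
--                 if pattern[i-1] != '*' and pattern[i] == '*' and pattern[i+1] != '*':
--                     pass
--                 else:
--                     filtered_pattern = filtered_pattern + pattern[i]
--             else:
--                 filtered_pattern = filtered_pattern + pattern[i]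
--         else:
--             filtered_pattern = filtered_pattern + pattern[i]
--     return filtered_pattern
-- ===== SOURCE B (Python) =====
-- from itertools import groupby
--
--
-- def pattern_filter(pattern):
--     '''
--     Removes repeating '*'s in a pattern sequence
--     '''
--     groups = [(ch, sum(1 for _ in grp)) for ch, grp in groupby(pattern)]
--     n = len(groups)
--     pieces = []
--     for idx, (ch, count) in enumerate(groups):
--         if ch != '*':
--             pieces.append(ch * count)
--         elif count == 1 and 0 < idx < n - 1:
--             pass  # isolated interior '*' is dropped
--         else:
--             pieces.append('*')
--     return ''.join(pieces)
-- ===== Notes on version B (the rewrite author's own statement) =====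
-- stated objective: alternative
-- what changed: B replaces A's index loop with +-1 lookahead/lookbehind by a run-length (itertools.groupby) decomposition: non-star runs are copied, each star run collapses to a single star, and a length-1 interior star group is dropped.
import Mathlib
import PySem

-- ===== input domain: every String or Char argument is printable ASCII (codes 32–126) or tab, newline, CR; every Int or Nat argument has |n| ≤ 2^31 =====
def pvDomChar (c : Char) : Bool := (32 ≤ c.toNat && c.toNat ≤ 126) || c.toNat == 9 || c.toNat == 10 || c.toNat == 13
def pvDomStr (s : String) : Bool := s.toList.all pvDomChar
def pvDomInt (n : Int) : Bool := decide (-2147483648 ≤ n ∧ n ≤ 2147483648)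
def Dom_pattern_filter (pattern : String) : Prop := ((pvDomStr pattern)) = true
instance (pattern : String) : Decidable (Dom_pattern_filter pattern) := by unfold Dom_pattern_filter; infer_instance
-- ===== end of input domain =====

-- B replaces A's index loop (±1 lookahead/lookbehind) by a run-length (groupby) decomposition; same values, different traversal.


-- ===== PORT A =====
-- one step of A's 'for i in range(len(pattern))' loop (acc = filtered_pattern as a char list;
-- every index A reads is guarded in range, so pyGetD's default is never used)
def pvStepA (cs : List Char) (acc : List Char) (i : Int) : List Char :=
  if i < (cs.length : Int) - 1 then
    if PySem.List.pyGetD cs i ' ' = '*' ∧ PySem.List.pyGetD cs (i+1) ' ' = '*' then acc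
    else if 0 < i then
      if PySem.List.pyGetD cs (i-1) ' ' ≠ '*' ∧ PySem.List.pyGetD cs i ' ' = '*' ∧ PySem.List.pyGetD cs (i+1) ' ' ≠ '*' then acc
      else acc ++ [PySem.List.pyGetD cs i ' ']
    else acc ++ [PySem.List.pyGetD cs i ' ']
  else acc ++ [PySem.List.pyGetD cs i ' ']

def pattern_filter (pattern : String) : String :=
  String.ofList ((PySem.List.pyRange 0 (PySem.Str.len pattern) 1).foldl (pvStepA pattern.toList) [])

-- ===== PORT B =====
-- itertools.groupby: maximal runs as (char, count) groups
def pvRle : List Char → List (Char × Nat)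
  | [] => []
  | c :: t =>
    (c, (t.takeWhile (fun d => d = c)).length + 1) :: pvRle (t.dropWhile (fun d => d = c))
termination_by cs => cs.length
decreasing_by
  simpa using Nat.lt_succ_of_le (List.length_dropWhile_le _ _)

-- one step of B's 'for idx, (ch, count) in enumerate(groups)' loop
def pvStepB (n : Nat) (acc : List Char) (p : Int × (Char × Nat)) : List Char :=
  if p.2.1 ≠ '*' then acc ++ List.replicate p.2.2 p.2.1
  else if p.2.2 = 1 ∧ 0 < p.1 ∧ p.1 < (n : Int) - 1 then acc
  else acc ++ ['*']

def pattern_filter_alt (pattern : String) : String :=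
  let groups := pvRle pattern.toList
  String.ofList ((PySem.List.enumerate groups 0).foldl (pvStepB groups.length) [])

-- ===== PRECONDITION & SPEC =====
def Spec_pattern_filter (pattern : String) (out : String) : Prop := out = pattern_filter_alt pattern
instance (pattern : String) (out : String) : Decidable (Spec_pattern_filter pattern out) := by unfold Spec_pattern_filter; infer_instance

-- ===== CLAIM (what is proved, stated in full; the proofs are below) =====
def Claim_equal_pattern_filter : Prop := ∀ (pattern : String), Dom_pattern_filter pattern → Spec_pattern_filter pattern (pattern_filter pattern)



-- A's loop as structural recursion on the suffix, carrying the previous character (none at i = 0)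
def pvFA : Option Char → List Char → List Char
  | _, [] => []
  | prev, c :: rest =>
    match rest with
    | [] => [c]
    | d :: _ =>
      if c = '*' ∧ d = '*' then pvFA (some c) rest
      else if (prev ≠ none ∧ prev ≠ some '*') ∧ c = '*' ∧ d ≠ '*' then pvFA (some c) rest
      else c :: pvFA (some c) rest

-- B's loop as structural recursion on the groups, carrying 'is this the first group'
def pvGB : Bool → List (Char × Nat) → List Char
  | _, [] => []
  | first, (c, k) :: gs =>
    (if c ≠ '*' then List.replicate k c
     else if k = 1 ∧ first = false ∧ gs ≠ [] then []
     else ['*']) ++ pvGB false gs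

theorem pvFA_nil (prev : Option Char) : pvFA prev [] = [] := by cases prev <;> rfl


theorem pvLoopA (cs : List Char) (j : Nat) (acc : List Char) (hj : j ≤ cs.length) :
    (PySem.List.pyRange (j : Int) (cs.length : Int) 1).foldl (pvStepA cs) acc
      = acc ++ pvFA (if j = 0 then none else cs[j-1]?) (cs.drop j) := by
  induction hk : cs.length - j generalizing j acc with
  | zero =>
    have hj' : j = cs.length := by omega
    subst hj'
    rw [PySem.List.pyRange_one_eq_nil (le_refl _)]
    simp [pvFA_nil]
  | succ k ih =>
    have hlt : j < cs.length := by omega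
    rw [PySem.List.pyRange_one_cons (by exact_mod_cast hlt), List.foldl_cons]
    have hcast : ((j:Int) + 1) = ((j+1 : Nat) : Int) := by push_cast; ring
    rw [hcast, ih (j+1) _ (by omega) (by omega)]
    have hprev : (if j+1 = 0 then none else cs[j+1-1]?) = some cs[j] := by
      simp [List.getElem?_eq_getElem hlt]
    rw [hprev, List.drop_eq_getElem_cons hlt]
    have hgj : PySem.List.pyGetD cs (j:Int) ' ' = cs[j] := by
      rw [PySem.List.pyGetD_natCast]; simp [List.getD_eq_getElem?_getD, List.getElem?_eq_getElem hlt]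
    by_cases hlast : j + 1 = cs.length
    · -- last character: always appended
      have hc : ¬ ((j:Int) < (cs.length:Int) - 1) := by omega
      have hdrop : cs.drop (j+1) = [] := by simp [hlast]
      rw [hdrop]
      simp [pvStepA, hc, hgj, pvFA]
    · have hlt2 : j + 1 < cs.length := by omega
      have hc : ((j:Int) < (cs.length:Int) - 1) := by omega
      have hgj1 : PySem.List.pyGetD cs ((j:Int)+1) ' ' = cs[j+1] := by
        rw [hcast, PySem.List.pyGetD_natCast]
        simp [List.getD_eq_getElem?_getD, List.getElem?_eq_getElem hlt2]
      rw [List.drop_eq_getElem_cons hlt2]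
      by_cases hb1 : cs[j] = '*' ∧ cs[j+1] = '*'
      · simp [pvStepA, hc, hgj, hgj1, hb1, pvFA, ← List.drop_eq_getElem_cons hlt2]
      · by_cases hj0 : 0 < j
        · have hgjm : PySem.List.pyGetD cs ((j:Int)-1) ' ' = cs[j-1] := by
            have : ((j:Int) - 1) = ((j-1 : Nat) : Int) := by omega
            rw [this, PySem.List.pyGetD_natCast]
            simp [List.getD_eq_getElem?_getD, List.getElem?_eq_getElem (by omega : j-1 < cs.length)]
          have hprevj : (if j = 0 then none else cs[j-1]?) = some cs[j-1] := by
            simp [Nat.pos_iff_ne_zero.mp hj0, List.getElem?_eq_getElem (by omega : j-1 < cs.length)]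
          rw [hprevj]
          by_cases hb2 : cs[j-1] ≠ '*' ∧ cs[j] = '*' ∧ cs[j+1] ≠ '*'
          · simp [pvStepA, hc, hgj, hgj1, hgjm, hb1, hb2, hj0, pvFA, ← List.drop_eq_getElem_cons hlt2]
          · simp [pvStepA, hc, hgj, hgj1, hgjm, hb1, hb2, hj0, pvFA, ← List.drop_eq_getElem_cons hlt2]
        · have hj0' : j = 0 := by omega
          subst hj0'
          simp only [pvStepA, pvFA]
          rw [if_pos hc, hgj, hgj1, if_neg hb1]
          simp [hb1]

theorem pvFA_cons₂ (p : Option Char) (c d : Char) (t : List Char) :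
    pvFA p (c :: d :: t)
      = if c = '*' ∧ d = '*' then pvFA (some c) (d :: t)
        else if (p ≠ none ∧ p ≠ some '*') ∧ c = '*' ∧ d ≠ '*' then pvFA (some c) (d :: t)
        else c :: pvFA (some c) (d :: t) := rfl

theorem pvFA_singleton (p : Option Char) (c : Char) : pvFA p [c] = [c] := rfl

theorem pvLoopB (gs : List (Char × Nat)) (n : Nat) (i : Nat) (acc : List Char)
    (hn : i + gs.length = n) :
    (PySem.List.enumerate gs (i : Int)).foldl (pvStepB n) acc
      = acc ++ pvGB (decide (i = 0)) gs := by
  induction gs generalizing i acc with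
  | nil => simp [PySem.List.enumerate_nil, pvGB]
  | cons g t ih =>
    obtain ⟨c, k⟩ := g
    rw [PySem.List.enumerate_cons, List.foldl_cons]
    have hcast : ((i:Int) + 1) = ((i+1 : Nat) : Int) := by push_cast; ring
    rw [hcast, ih (i+1) _ (by simp at hn ⊢; omega)]
    rw [show (decide (i + 1 = 0)) = false by simp]
    simp only [pvGB, decide_eq_false_iff_not]
    by_cases hc : c = '*'
    · subst hc
      by_cases hi : i = 0
      · subst hi
        simp [pvStepB]
      · by_cases htn : t = []
        · subst htn
          have h2 : ¬ ((i:Int) < (n:Int) - 1) := by simp at hn; omega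
          simp [pvStepB, h2, hi]
        · have h1 : (0:Int) < (i:Int) := by omega
          have h2 : (i:Int) < (n:Int) - 1 := by
            have : 0 < t.length := List.length_pos_iff.mpr htn
            simp at hn; omega
          by_cases hk : k = 1
          · simp [pvStepB, hk, h2, hi, htn]
          · simp [pvStepB, hk, hi, htn]
    · simp [pvStepB, hc]

theorem pvRle_nil_iff (l : List Char) : pvRle l = [] ↔ l = [] := by
  cases l <;> simp [pvRle]

theorem pvFA_run_nonstar (c : Char) (hc : c ≠ '*') (k : Nat) (rest : List Char) (p : Option Char) :
    pvFA p (List.replicate (k+1) c ++ rest)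
      = List.replicate (k+1) c ++ pvFA (some c) rest := by
  induction k generalizing p with
  | zero =>
    cases rest with
    | nil => simp [pvFA_singleton, pvFA_nil]
    | cons d t => simp [pvFA_cons₂, hc]
  | succ m ih =>
    have hcons : List.replicate (m+1) c ++ rest = c :: (List.replicate m c ++ rest) := by
      simp [List.replicate_succ]
    have h2 : List.replicate (m+1+1) c ++ rest = c :: c :: (List.replicate m c ++ rest) := by
      simp [List.replicate_succ]
    rw [h2, pvFA_cons₂, if_neg (by simp [hc]), if_neg (by simp [hc]), ← hcons, ih]
    simp [List.replicate_succ]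

theorem pvFA_run_star (k : Nat) (rest : List Char) (p : Option Char)
    (hr : rest.head? ≠ some '*') :
    pvFA p (List.replicate (k+1) '*' ++ rest)
      = (if k = 0 ∧ p ≠ none ∧ p ≠ some '*' ∧ rest ≠ [] then [] else ['*'])
        ++ pvFA (some '*') rest := by
  induction k generalizing p with
  | zero =>
    cases rest with
    | nil => simp [pvFA_singleton, pvFA_nil]
    | cons d t =>
      have hd : d ≠ '*' := by simpa using hr
      cases p with
      | none => simp [pvFA_cons₂, hd]
      | some q =>
        by_cases hq : q = '*'
        · subst hq; simp [pvFA_cons₂, hd]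
        · simp [pvFA_cons₂, hd, hq]
  | succ m ih =>
    have hcons : List.replicate (m+1) '*' ++ rest = '*' :: (List.replicate m '*' ++ rest) := by
      simp [List.replicate_succ]
    have h2 : List.replicate (m+1+1) '*' ++ rest = '*' :: '*' :: (List.replicate m '*' ++ rest) := by
      simp [List.replicate_succ]
    rw [h2, pvFA_cons₂, if_pos ⟨rfl, rfl⟩, ← hcons, ih (some '*')]
    simp

theorem pvMain (cs : List Char) (p : Option Char)
    (hp : ∀ q, p = some q → cs.head? ≠ some q) :
    pvFA p cs = pvGB p.isNone (pvRle cs) := by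
  induction cs using pvRle.induct generalizing p with
  | case1 => cases p <;> simp [pvFA_nil, pvRle, pvGB]
  | case2 c t ih =>
    have htw : t.takeWhile (fun d => d = c) = List.replicate (t.takeWhile (fun d => d = c)).length c := by
      rw [List.eq_replicate_iff]
      exact ⟨rfl, fun b hb => by simpa using List.mem_takeWhile_imp hb⟩
    have hsplit : c :: t = List.replicate ((t.takeWhile (fun d => d = c)).length + 1) c
        ++ t.dropWhile (fun d => d = c) := by
      rw [List.replicate_succ, List.cons_append]
      nth_rewrite 1 [← List.takeWhile_append_dropWhile (p := fun d => decide (d = c)) (l := t)]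
      rw [← htw]
    have hr : ∀ x, (t.dropWhile (fun d => d = c)).head? = some x → x ≠ c := by
      intro x hx
      have h := List.head?_dropWhile_not (fun d => decide (d = c)) t
      rw [hx] at h
      simpa using h
    have hrle : pvRle (c :: t) = (c, (t.takeWhile (fun d => d = c)).length + 1)
        :: pvRle (t.dropWhile (fun d => d = c)) := by
      rw [pvRle]
    rw [hrle]
    by_cases hc : c = '*'
    · subst hc
      rw [hsplit, pvFA_run_star _ _ _ (by
        intro h
        exact hr '*' h rfl)]
      rw [ih (some '*') (by
        intro q hq
        injection hq with hq'
        subst hq'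
        intro h
        exact hr '*' h rfl)]
      have hps : p ≠ some '*' := by
        intro h
        exact hp '*' h rfl
      cases p with
      | none => simp [pvGB, pvRle_nil_iff]
      | some q => simp [pvGB, pvRle_nil_iff, hps]
    · rw [hsplit, pvFA_run_nonstar c hc]
      rw [ih (some c) (by
        intro q hq
        injection hq with hq'
        subst hq'
        intro h
        exact hr c h rfl)]
      simp [pvGB, hc]

-- ===== VERDICT (by name: the statement is the Claim_ definition above) =====
theorem pattern_filter_spec : Claim_equal_pattern_filter := by
  intro pattern _
  unfold Spec_pattern_filter pattern_filter pattern_filter_alt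
  have hA := pvLoopA pattern.toList 0 [] (Nat.zero_le _)
  simp only [Nat.cast_zero] at hA
  rw [PySem.Str.len_eq, hA]
  have hB := pvLoopB (pvRle pattern.toList) (pvRle pattern.toList).length 0 [] (by simp)
  simp only [Nat.cast_zero, decide_true, List.nil_append] at hB
  simp only [List.nil_append, List.drop_zero, if_pos trivial]
  rw [pvMain pattern.toList none (by simp)]
  simp only [Option.isNone_none]
  exact congrArg String.ofList hB.symm
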